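-- pv_equiv track=rewrite | github.com/hendraet/ptm-visualization | protein_sequencing/data_preprocessing/preprocessor_helper.py | sort_by_index_and_exons
-- ===== SOURCE A (Python) =====
-- def sort_by_index_and_exons(entries):
--     """Sort the entries by index and exons."""
--     before = []
--     after = []
--     exon1 = []
--     exon2 = []
--     exon = False
--     for entry in entries:
--         _, type_part = entry.split("_")
--         if type_part == "general" and not exon:
--             before.append(entry)
--         elif type_part == "exon1":
--             exon1.append(entry)
--             exon = True
--         elif type_part == "exon2":
--             exon2.append(entry)
--             exon = True
--         else:
--             after.append(entry)
--     result = before + exon1 + exon2 + after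
--     return result
-- ===== SOURCE B (Python) =====
-- def sort_by_index_and_exons(entries):
--     """Sort the entries by index and exons."""
--     def kind(entry):
--         _, type_part = entry.split("_")
--         return type_part
--
--     pairs = [(entry, kind(entry)) for entry in entries]
--     # the leading stretch runs up to the first exon entry
--     cut = len(pairs)
--     for i, (_, k) in enumerate(pairs):
--         if k in ("exon1", "exon2"):
--             cut = i
--             break
--     head, tail = pairs[:cut], pairs[cut:]
--     return ([e for e, k in head if k == "general"]
--             + [e for e, k in pairs if k == "exon1"]
--             + [e for e, k in pairs if k == "exon2"]
--             + [e for e, k in head if k != "general"]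
--             + [e for e, k in tail if k not in ("exon1", "exon2")])
-- ===== Notes on version B (the rewrite author's own statement) =====
-- stated objective: alternative
-- what changed: Replaces A's single stateful four-accumulator loop by splitting the list at the first exon entry and concatenating five filter comprehensions over the head/whole/tail; Pre_ excludes entries where the split-unpack raises ValueError (not exactly one underscore), where both A and B raise.
import Mathlib
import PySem

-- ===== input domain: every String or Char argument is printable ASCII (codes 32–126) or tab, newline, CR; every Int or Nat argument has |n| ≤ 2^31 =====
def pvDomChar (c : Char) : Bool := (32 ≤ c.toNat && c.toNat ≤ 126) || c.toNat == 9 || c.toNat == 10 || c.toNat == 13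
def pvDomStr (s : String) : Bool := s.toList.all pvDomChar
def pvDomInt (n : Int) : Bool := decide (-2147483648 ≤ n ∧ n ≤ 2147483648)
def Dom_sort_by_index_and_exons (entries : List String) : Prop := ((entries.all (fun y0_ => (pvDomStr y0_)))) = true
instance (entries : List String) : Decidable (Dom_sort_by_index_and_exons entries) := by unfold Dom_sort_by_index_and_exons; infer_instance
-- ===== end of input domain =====

-- B splits the list at the first exon entry and concatenates five filter comprehensions
-- instead of A's single stateful four-accumulator loop; equivalence of the RETURN value.

-- ===== PORT A =====
-- the loop body of A: unpack `_, type_part = entry.split("_")` (malformed entries raise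
-- ValueError in Python — excluded by Pre_; the `| _ => st` arm is never reached there)
def pvStepA (st : List String × List String × List String × List String × Bool)
    (entry : String) : List String × List String × List String × List String × Bool :=
  match (PySem.Str.split? entry "_").getD [] with
  | [_, type_part] =>
    let (before, after, exon1, exon2, exon) := st
    if type_part == "general" && !exon then (before ++ [entry], after, exon1, exon2, exon)
    else if type_part == "exon1" then (before, after, exon1 ++ [entry], exon2, true)
    else if type_part == "exon2" then (before, after, exon1, exon2 ++ [entry], true)
    else (before, after ++ [entry], exon1, exon2, exon)
  | _ => st

def sort_by_index_and_exons (entries : List String) : List String :=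
  let s := entries.foldl pvStepA ([], [], [], [], false)
  s.1 ++ s.2.2.1 ++ s.2.2.2.1 ++ s.2.1

-- ===== PORT B =====
-- Source B's helper `kind` (the `| _ => ""` arm is the ValueError case, excluded by Pre_)
def pvKind (entry : String) : String :=
  match (PySem.Str.split? entry "_").getD [] with
  | [_, type_part] => type_part
  | _ => ""

-- Source B's `for i, (_, k) in enumerate(pairs): if k in (...): cut = i; break`
def pvFindCut : List (String × String) → Nat → Option Nat
  | [], _ => none
  | (_, k) :: ps, i =>
    if k == "exon1" || k == "exon2" then some i else pvFindCut ps (i + 1)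

def sort_by_index_and_exons_alt (entries : List String) : List String :=
  let pairs := entries.map (fun e => (e, pvKind e))
  let cut := (pvFindCut pairs 0).getD pairs.length
  let head := pairs.take cut
  let tail := pairs.drop cut
  ((head.filter (fun p => p.2 == "general")).map Prod.fst)
  ++ ((pairs.filter (fun p => p.2 == "exon1")).map Prod.fst)
  ++ ((pairs.filter (fun p => p.2 == "exon2")).map Prod.fst)
  ++ ((head.filter (fun p => !(p.2 == "general"))).map Prod.fst)
  ++ ((tail.filter (fun p => !(p.2 == "exon1" || p.2 == "exon2"))).map Prod.fst)

-- ===== PRECONDITION & SPEC =====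
-- Pre_ excludes exactly the entries on which Python's `_, type_part = entry.split("_")`
-- raises ValueError (not exactly one '_' in the entry); both A and B raise there.
def Pre_sort_by_index_and_exons (entries : List String) : Prop :=
  ∀ e ∈ entries, ((PySem.Str.split? e "_").getD []).length = 2
instance (entries : List String) : Decidable (Pre_sort_by_index_and_exons entries) := by
  unfold Pre_sort_by_index_and_exons; infer_instance
def pvWitness_sort_by_index_and_exons : List String :=
  ["10_general", "11_exon1", "12_exon2", "13_other", "14_general"]
def Spec_sort_by_index_and_exons (entries : List String) (out : List String) : Prop := out = sort_by_index_and_exons_alt entries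
instance (entries : List String) (out : List String) : Decidable (Spec_sort_by_index_and_exons entries out) := by unfold Spec_sort_by_index_and_exons; infer_instance

-- ===== CLAIM (what is proved, stated in full; the proofs are below) =====
def Claim_equal_sort_by_index_and_exons : Prop := ∀ (entries : List String), Dom_sort_by_index_and_exons entries → Pre_sort_by_index_and_exons entries → Spec_sort_by_index_and_exons entries (sort_by_index_and_exons entries)

-- ===== LEMMAS AND PROOFS =====

-- classification predicates
def pvIsEx (t : String) : Bool := t == "exon1" || t == "exon2"
def pvP0 (e : String) : Bool := !(pvKind e == "exon1") && !(pvKind e == "exon2") && (pvKind e == "general")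
def pvP3a (e : String) : Bool := !(pvKind e == "exon1") && !(pvKind e == "exon2") && !(pvKind e == "general")
def pvP3b (e : String) : Bool := !(pvKind e == "exon1") && !(pvKind e == "exon2")
def pvEx1 (e : String) : Bool := pvKind e == "exon1"
def pvEx2 (e : String) : Bool := pvKind e == "exon2"

-- A's loop body rewritten through pvKind (valid on entries Pre_ admits)
def pvStep' (st : List String × List String × List String × List String × Bool)
    (entry : String) : List String × List String × List String × List String × Bool :=
  let t := pvKind entry
  if t == "general" && !st.2.2.2.2 then (st.1 ++ [entry], st.2.1, st.2.2.1, st.2.2.2.1, st.2.2.2.2)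
  else if t == "exon1" then (st.1, st.2.1, st.2.2.1 ++ [entry], st.2.2.2.1, true)
  else if t == "exon2" then (st.1, st.2.1, st.2.2.1, st.2.2.2.1 ++ [entry], true)
  else (st.1, st.2.1 ++ [entry], st.2.2.1, st.2.2.2.1, st.2.2.2.2)

theorem pvStepA_eq (st : List String × List String × List String × List String × Bool)
    (e : String) (h : ((PySem.Str.split? e "_").getD []).length = 2) :
    pvStepA st e = pvStep' st e := by
  obtain ⟨b, a, e1, e2, f⟩ := st
  cases hl : (PySem.Str.split? e "_").getD [] with
  | nil => rw [hl] at h; simp at h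
  | cons x l =>
    cases l with
    | nil => rw [hl] at h; simp at h
    | cons t l' =>
      cases l' with
      | nil => simp [pvStepA, pvStep', pvKind, hl]
      | cons u l'' => rw [hl] at h; simp at h

-- A's loop once the exon flag is set
theorem pv_foldA_true (es : List String) : ∀ (b a e1 e2 : List String),
    es.foldl pvStep' (b, a, e1, e2, true) =
      (b, a ++ es.filter pvP3b, e1 ++ es.filter pvEx1, e2 ++ es.filter pvEx2, true) := by
  induction es with
  | nil => intro b a e1 e2; simp
  | cons e es ih =>
    intro b a e1 e2
    by_cases h1 : pvKind e == "exon1" <;> by_cases h2 : pvKind e == "exon2" <;>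
      simp_all [pvStep', pvEx1, pvEx2, pvP3b]

-- A's loop before the exon flag is set
theorem pv_foldA_false (es : List String) : ∀ (b a e1 e2 : List String),
    es.foldl pvStep' (b, a, e1, e2, false) =
      (b ++ (es.takeWhile (fun e => !pvIsEx (pvKind e))).filter pvP0,
       a ++ (es.takeWhile (fun e => !pvIsEx (pvKind e))).filter pvP3a
         ++ (es.dropWhile (fun e => !pvIsEx (pvKind e))).filter pvP3b,
       e1 ++ es.filter pvEx1, e2 ++ es.filter pvEx2,
       es.any (fun e => pvIsEx (pvKind e))) := by
  induction es with
  | nil => intro b a e1 e2; simp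
  | cons e es ih =>
    intro b a e1 e2
    by_cases hx : pvIsEx (pvKind e)
    · have h1h2 : (pvKind e == "exon1") = true ∨ (pvKind e == "exon2") = true := by
        simpa [pvIsEx] using hx
      rcases h1h2 with h1 | h1 <;>
        simp [pvStep', pvEx1, pvEx2, pvP3b, pvIsEx, pv_foldA_true,
          eq_of_beq h1]
    · have hx' : ¬pvKind e = "exon1" ∧ ¬pvKind e = "exon2" := by simpa [pvIsEx] using hx
      obtain ⟨h1, h2⟩ := hx'
      by_cases hg : pvKind e == "general" <;>
        simp_all [pvStep', pvEx1, pvEx2, pvP3a, pvP0, pvIsEx]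

-- small list facts
theorem pv_take_takeWhile {α : Type} (p : α → Bool) (l : List α) :
    l.take (l.takeWhile p).length = l.takeWhile p := by
  induction l with
  | nil => rfl
  | cons x xs ih => by_cases h : p x <;> simp [h, ih]

theorem pv_drop_takeWhile {α : Type} (p : α → Bool) (l : List α) :
    l.drop (l.takeWhile p).length = l.dropWhile p := by
  induction l with
  | nil => rfl
  | cons x xs ih => by_cases h : p x <;> simp [h, ih]

-- filter-over-pairs-then-fst = filter over the entries
theorem pv_pairs_filter (q : String × String → Bool) (l : List String) :
    ((l.map (fun e => (e, pvKind e))).filter q).map Prod.fst =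
      l.filter (fun e => q (e, pvKind e)) := by
  induction l with
  | nil => rfl
  | cons x xs ih => by_cases h : q (x, pvKind x) <;> simp [h, ih]

-- the for/break cut = length of the stretch before the first exon entry
theorem pv_cut_eq (l : List String) : ∀ (i : Nat),
    (pvFindCut (l.map (fun e => (e, pvKind e))) i).getD (i + l.length) =
      i + (l.takeWhile (fun e => !pvIsEx (pvKind e))).length := by
  induction l with
  | nil => intro i; simp [pvFindCut]
  | cons x xs ih =>
    intro i
    by_cases h : pvIsEx (pvKind x)
    · have h' : (pvKind x == "exon1" || pvKind x == "exon2") = true := by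
        simpa [pvIsEx] using h
      simp [pvFindCut, h', h]
    · have h' : (pvKind x == "exon1" || pvKind x == "exon2") = false := by
        simpa [pvIsEx] using h
      have hrec := ih (i + 1)
      simp only [List.map_cons, pvFindCut, h', Bool.false_eq_true, if_false,
        List.length_cons]
      rw [show i + (xs.length + 1) = i + 1 + xs.length by omega, hrec,
        List.takeWhile_cons]
      have hb : pvIsEx (pvKind x) = false := by simpa using h
      rw [if_pos (by simp [hb])]
      simp only [List.length_cons]
      omega

theorem pv_both (entries : List String) (h : Pre_sort_by_index_and_exons entries) :
    sort_by_index_and_exons entries = sort_by_index_and_exons_alt entries := by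
  have hstep : entries.foldl pvStepA ([], [], [], [], false) =
      entries.foldl pvStep' ([], [], [], [], false) :=
    PySem.List.foldl_congr_mem _ _ _ _ (fun acc x hx => pvStepA_eq acc x (h x hx))
  simp only [sort_by_index_and_exons, sort_by_index_and_exons_alt]
  rw [hstep, pv_foldA_false]
  have hcut : ((pvFindCut (entries.map (fun e => (e, pvKind e))) 0).getD
      (entries.map (fun e => (e, pvKind e))).length) =
      (entries.takeWhile (fun e => !pvIsEx (pvKind e))).length := by
    have := pv_cut_eq entries 0
    simpa using this
  rw [hcut]
  rw [← List.map_take, ← List.map_drop, pv_take_takeWhile, pv_drop_takeWhile]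
  simp only [pv_pairs_filter]
  have hmem : ∀ e ∈ entries.takeWhile (fun e => !pvIsEx (pvKind e)),
      (!pvIsEx (pvKind e)) = true := fun e he => List.mem_takeWhile_imp (p := fun e => !pvIsEx (pvKind e)) he
  have hgen : (entries.takeWhile (fun e => !pvIsEx (pvKind e))).filter
      (fun e => pvKind e == "general") =
      (entries.takeWhile (fun e => !pvIsEx (pvKind e))).filter pvP0 := by
    refine List.filter_congr fun e he => ?_
    have := hmem e he
    simp only [pvIsEx, Bool.not_or, Bool.and_eq_true, Bool.not_eq_true'] at this
    simp [pvP0, this.1, this.2]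
  have hng : (entries.takeWhile (fun e => !pvIsEx (pvKind e))).filter
      (fun e => !(pvKind e == "general")) =
      (entries.takeWhile (fun e => !pvIsEx (pvKind e))).filter pvP3a := by
    refine List.filter_congr fun e he => ?_
    have := hmem e he
    simp only [pvIsEx, Bool.not_or, Bool.and_eq_true, Bool.not_eq_true'] at this
    simp [pvP3a, this.1, this.2]
  have hb : (entries.dropWhile (fun e => !pvIsEx (pvKind e))).filter
      (fun e => !(pvKind e == "exon1" || pvKind e == "exon2")) =
      (entries.dropWhile (fun e => !pvIsEx (pvKind e))).filter pvP3b := by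
    refine List.filter_congr fun e _ => ?_
    simp [pvP3b, Bool.not_or]
  rw [hgen, hng, hb]
  simp only [List.nil_append, List.append_assoc]
  rfl

-- ===== VERDICT (by name: the statement is the Claim_ definition above) =====
theorem sort_by_index_and_exons_spec : Claim_equal_sort_by_index_and_exons := by
  intro entries _ hpre
  unfold Spec_sort_by_index_and_exons
  rw [pv_both entries hpre]
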